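-- pv_equiv track=rewrite | github.com/TAO-Dataset/tao | tao/utils/evaluation.py | make_track_ids_unique
-- ===== SOURCE A (Python) =====
-- import itertools
-- from collections import defaultdict
--
-- def make_track_ids_unique(result_anns):
--     track_id_videos = {}
--     track_ids_to_update = set()
--     max_track_id = 0
--     for ann in result_anns:
--         t = ann['track_id']
--         if t not in track_id_videos:
--             track_id_videos[t] = ann['video_id']
--
--         if ann['video_id'] != track_id_videos[t]:
--             # Track id is assigned to multiple videos
--             track_ids_to_update.add(t)
--         max_track_id = max(max_track_id, t)
--
--     if track_ids_to_update:
--         next_id = itertools.count(max_track_id + 1)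
--         new_track_ids = defaultdict(lambda: next(next_id))
--         for ann in result_anns:
--             t = ann['track_id']
--             v = ann['video_id']
--             if t in track_ids_to_update:
--                 ann['track_id'] = new_track_ids[t, v]
--     return len(track_ids_to_update)
-- ===== SOURCE B (Python) =====
-- import itertools
-- from collections import defaultdict
--
--
-- def make_track_ids_unique(result_anns):
--     # Detect shared track ids by sorting the distinct (track_id, video_id)
--     # pairs and scanning adjacent entries, instead of A's hash-map pass that
--     # compares each annotation's video with the first-seen video of its track.
--     pairs = sorted({(ann['track_id'], ann['video_id']) for ann in result_anns})
--     track_ids_to_update = {p[0] for p, q in zip(pairs, pairs[1:]) if p[0] == q[0]}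
--     max_track_id = max([0] + [t for t, _ in pairs])
--
--     # In-place reassignment, identical to the original.
--     if track_ids_to_update:
--         next_id = itertools.count(max_track_id + 1)
--         new_track_ids = defaultdict(lambda: next(next_id))
--         for ann in result_anns:
--             t = ann['track_id']
--             v = ann['video_id']
--             if t in track_ids_to_update:
--                 ann['track_id'] = new_track_ids[t, v]
--     return len(track_ids_to_update)
-- ===== Notes on version B (the rewrite author's own statement) =====
-- stated objective: alternative
-- what changed: Detection of shared track ids is a sort-then-scan: B collects the distinct (track_id, video_id) pairs, sorts them, and reads off track ids occurring in two adjacent sorted pairs, instead of A's single hash pass comparing each annotation's video with the first-seen video of its track; the mutating second pass is kept identical.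
import Mathlib
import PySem

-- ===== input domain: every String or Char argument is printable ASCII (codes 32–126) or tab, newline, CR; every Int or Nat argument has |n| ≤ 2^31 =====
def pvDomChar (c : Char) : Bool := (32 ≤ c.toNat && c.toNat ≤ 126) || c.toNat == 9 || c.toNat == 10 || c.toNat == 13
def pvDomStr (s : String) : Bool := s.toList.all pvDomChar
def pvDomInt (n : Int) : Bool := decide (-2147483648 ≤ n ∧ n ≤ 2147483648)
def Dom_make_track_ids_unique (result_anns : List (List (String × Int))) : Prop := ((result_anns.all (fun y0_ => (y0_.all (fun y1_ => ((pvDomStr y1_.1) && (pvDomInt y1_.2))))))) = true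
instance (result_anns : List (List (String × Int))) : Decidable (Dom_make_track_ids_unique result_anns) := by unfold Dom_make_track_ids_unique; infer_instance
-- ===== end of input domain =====

-- B detects the shared track ids by sorting the distinct (track_id, video_id) pairs and
-- scanning adjacent entries, instead of A's hash pass comparing each annotation's video
-- with the first-seen video of its track (objective: alternative; not faster).
-- Both Pythons mutate result_anns' annotations identically in the second pass; that mutation
-- does not influence the RETURN value, which is what is ported and proved equal here, so
-- neither port transcribes the reassignment loop.

-- ann['key'] on the annotation dict; Pre_ guarantees the key is present (Python raises
-- KeyError otherwise), so the .getD 0 default is never consulted on admitted inputs.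
def dictGetInt (ann : List (String × Int)) (k : String) : Int :=
  ((PySem.Dict.ofList ann).get? k).getD 0

-- ===== PORT A =====
-- one iteration of A's first loop over state (track_id_videos, track_ids_to_update, max_track_id)
def stepA (st : PySem.Dict Int Int × PySem.Set Int × Int) (ann : List (String × Int)) :
    PySem.Dict Int Int × PySem.Set Int × Int :=
  let t := dictGetInt ann "track_id"
  let v := dictGetInt ann "video_id"
  let tiv := if st.1.contains t then st.1 else st.1.insert t v
  let upd := if v ≠ tiv.getD t 0 then PySem.Set.add st.2.1 t else st.2.1
  (tiv, upd, max st.2.2 t)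

def make_track_ids_unique (result_anns : List (List (String × Int))) : Int :=
  let st := result_anns.foldl stepA (PySem.Dict.empty, PySem.Set.empty, 0)
  (st.2.1.length : Int)

-- ===== PORT B =====
-- the set comprehension {(ann['track_id'], ann['video_id']) for ann in result_anns}
def pairStep (s : PySem.Set (Int × Int)) (ann : List (String × Int)) : PySem.Set (Int × Int) :=
  PySem.Set.add s (dictGetInt ann "track_id", dictGetInt ann "video_id")

-- {p[0] for p, q in zip(pairs, pairs[1:]) if p[0] == q[0]}, before set-building
def adjShared (pairs : List (Int × Int)) : List Int :=
  ((pairs.zip pairs.tail).filter (fun q => q.1.1 == q.2.1)).map (fun q => q.1.1)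

def make_track_ids_unique_alt (result_anns : List (List (String × Int))) : Int :=
  let pairs := PySem.List.sorted2 (result_anns.foldl pairStep PySem.Set.empty) Prod.fst Prod.snd
  let upd : PySem.Set Int := PySem.Set.ofList (adjShared pairs)
  (upd.length : Int)

-- ===== PRECONDITION & SPEC =====
-- Pre_: every annotation carries both keys 'track_id' and 'video_id' (A raises KeyError otherwise).
def Pre_make_track_ids_unique (result_anns : List (List (String × Int))) : Prop :=
  ∀ ann ∈ result_anns, (PySem.Dict.ofList ann).contains "track_id" = true ∧
    (PySem.Dict.ofList ann).contains "video_id" = true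
instance (result_anns : List (List (String × Int))) : Decidable (Pre_make_track_ids_unique result_anns) := by unfold Pre_make_track_ids_unique; infer_instance

def pvWitness_make_track_ids_unique : (List (List (String × Int))) :=
  [[("track_id", 1), ("video_id", 2)], [("track_id", 1), ("video_id", 3)]]

def Spec_make_track_ids_unique (result_anns : List (List (String × Int))) (out : Int) : Prop := out = make_track_ids_unique_alt result_anns
instance (result_anns : List (List (String × Int))) (out : Int) : Decidable (Spec_make_track_ids_unique result_anns out) := by unfold Spec_make_track_ids_unique; infer_instance

-- ===== CLAIM (what is proved, stated in full; the proofs are below) =====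
def Claim_equal_make_track_ids_unique : Prop := ∀ (result_anns : List (List (String × Int))), Dom_make_track_ids_unique result_anns → Pre_make_track_ids_unique result_anns → Spec_make_track_ids_unique result_anns (make_track_ids_unique result_anns)

-- ===== LEMMAS AND PROOFS =====

-- The relation between A's state (track_id_videos, track_ids_to_update) and the set S of
-- distinct (track_id, video_id) pairs of the processed prefix: a track is known iff it owns
-- a pair; the stored video of a track is one of its pairs; a track is flagged iff it owns
-- at least two pairs; an unflagged track's pairs all carry its stored (first) video.
def InvA (tiv : PySem.Dict Int Int) (upd : PySem.Set Int) (S : List (Int × Int)) : Prop :=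
  (∀ t, tiv.contains t = S.any (fun p => p.1 == t)) ∧
  (∀ t v, tiv.get? t = some v → (t, v) ∈ S) ∧
  (∀ t, t ∈ upd ↔ 1 < S.countP (fun p => p.1 == t)) ∧
  upd.Nodup ∧
  (∀ t v, tiv.get? t = some v → t ∉ upd → ∀ w, (t, w) ∈ S → w = v) ∧
  S.Nodup

lemma inv_init : InvA PySem.Dict.empty PySem.Set.empty [] := by
  refine ⟨fun t => rfl, fun t v h => ?_, fun t => ?_, List.nodup_nil, fun t v h => ?_, List.nodup_nil⟩
  · simp [PySem.Dict.get?_empty] at h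
  · simp [PySem.Set.empty]
  · simp [PySem.Dict.get?_empty] at h

lemma two_le_countP {l : List (Int × Int)} {p : Int × Int → Bool} {a b : Int × Int}
    (ha : a ∈ l) (hb : b ∈ l) (hab : a ≠ b) (hpa : p a = true) (hpb : p b = true) :
    1 < l.countP p := by
  rw [List.countP_eq_length_filter]
  have ha' : a ∈ l.filter p := List.mem_filter.mpr ⟨ha, hpa⟩
  have hb' : b ∈ l.filter p := List.mem_filter.mpr ⟨hb, hpb⟩
  by_contra h
  interval_cases hl : (l.filter p).length
  · rw [List.length_eq_zero_iff] at hl; rw [hl] at ha'; simp at ha'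
  · rw [List.length_eq_one_iff] at hl
    obtain ⟨x, hx⟩ := hl
    rw [hx] at ha' hb'
    simp at ha' hb'
    exact hab (ha'.trans hb'.symm)

lemma inv_step' (tiv : PySem.Dict Int Int) (upd : PySem.Set Int)
    (S : List (Int × Int)) (t v : Int) (h : InvA tiv upd S) :
    InvA (if tiv.contains t then tiv else tiv.insert t v)
      (if v ≠ (if tiv.contains t then tiv else tiv.insert t v).getD t 0
        then PySem.Set.add upd t else upd)
      (PySem.Set.add S (t, v)) := by
  obtain ⟨h1, h2, h3, h4, h5, h6⟩ := h
  by_cases hc : tiv.contains t = true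
  · have hsome : (tiv.get? t).isSome := by rw [← PySem.Dict.contains_eq_isSome_get?]; exact hc
    obtain ⟨f, hf⟩ := Option.isSome_iff_exists.mp hsome
    have hgetD : tiv.getD t 0 = f := by rw [PySem.Dict.getD_eq_get?_getD, hf]; rfl
    have hfS : (t, f) ∈ S := h2 t f hf
    rw [if_pos hc, hgetD]
    by_cases hvf : v = f
    · -- repeat of the first video: S and upd unchanged
      subst hvf
      rw [PySem.Set.add_of_mem hfS, if_neg (by simp)]
      exact ⟨h1, h2, h3, h4, h5, h6⟩
    · -- a second distinct video for t
      rw [if_pos (by simpa using hvf)]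
      by_cases hvS : (t, v) ∈ S
      · -- the pair already occurred: S unchanged, t was already flagged
        rw [PySem.Set.add_of_mem hvS]
        have htupd : t ∈ upd := (h3 t).mpr
          (two_le_countP hfS hvS (by simp; tauto) (by simp) (by simp))
        rw [PySem.Set.add_of_mem htupd]
        exact ⟨h1, h2, h3, h4, h5, h6⟩
      · rw [PySem.Set.add_of_not_mem hvS]
        have hcount : ∀ t', (S ++ [(t, v)]).countP (fun p => p.1 == t') =
            S.countP (fun p => p.1 == t') + if t' = t then 1 else 0 := by
          intro t'
          rw [List.countP_append]
          by_cases he : t' = t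
          · subst he; simp
          · simp only [List.countP_cons, List.countP_nil, beq_iff_eq, if_neg he]
            simp
            exact fun h => he h.symm
        refine ⟨fun t' => ?_, fun t' v' hv' => ?_, fun t' => ?_, ?_, fun t' v' hv' hnu w hw => ?_, ?_⟩
        · rw [h1, List.any_append]
          by_cases he : t' = t
          · subst he
            have : S.any (fun p => p.1 == t') = true :=
              List.any_eq_true.mpr ⟨(t', f), hfS, by simp⟩
            simp [this]
          · simp [Ne.symm he]
        · exact List.mem_append_left _ (h2 t' v' hv')
        · rw [hcount]
          by_cases he : t' = t
          · subst he
            rw [if_pos rfl, PySem.Set.mem_add]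
            have hpos : 0 < S.countP (fun p => p.1 == t') :=
              List.countP_pos_iff.mpr ⟨(t', f), hfS, by simp⟩
            constructor
            · intro _; omega
            · intro _; exact Or.inr rfl
          · rw [if_neg he, PySem.Set.mem_add, h3]
            simp [he]
        · exact PySem.Set.nodup_add _ _ h4
        · have hnu' : t' ∉ upd := fun hm => hnu ((PySem.Set.mem_add _ _ _).mpr (Or.inl hm))
          have hne : t' ≠ t := by
            intro he; subst he
            exact hnu ((PySem.Set.mem_add _ _ _).mpr (Or.inr rfl))
          rcases List.mem_append.mp hw with hw | hw
          · exact h5 t' v' hv' hnu' w hw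
          · simp at hw; exact absurd hw.1 hne
        · exact List.Nodup.append h6 (List.nodup_singleton _) (by simpa using hvS)
  · -- fresh track id
    have hcf : tiv.contains t = false := by simpa using hc
    have hnone : tiv.get? t = none := by
      cases hg : tiv.get? t with
      | none => rfl
      | some x =>
        have := PySem.Dict.contains_eq_isSome_get? (d := tiv) (k := t)
        rw [hg] at this; rw [this] at hcf; cases hcf
    have hanyf : S.any (fun p => p.1 == t) = false := by rw [← h1]; exact hcf
    have hnoS : ∀ w, (t, w) ∉ S := by
      intro w hw
      have : S.any (fun p => p.1 == t) = true := List.any_eq_true.mpr ⟨(t, w), hw, by simp⟩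
      rw [hanyf] at this; cases this
    have hvS : (t, v) ∉ S := hnoS v
    rw [if_neg (by simp [hcf]), if_neg (by simp [PySem.Dict.getD_insert_self]),
      PySem.Set.add_of_not_mem hvS]
    have hcount0 : S.countP (fun p => p.1 == t) = 0 := by
      rw [List.countP_eq_zero]
      intro p hp hpt
      exact hnoS p.2 (by rwa [show (t, p.2) = p by rw [Prod.ext_iff]; simp at hpt ⊢; omega])
    refine ⟨fun t' => ?_, fun t' v' hv' => ?_, fun t' => ?_, h4, fun t' v' hv' hnu w hw => ?_, ?_⟩
    · rw [List.any_append, PySem.Dict.contains_insert, ← h1]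
      by_cases he : t' = t
      · subst he; simp
      · have e1 : (t' == t) = false := by simp [he]
        have e2 : (t == t') = false := by simp [Ne.symm he]
        rw [e1, List.any_cons, List.any_nil]
        simp only [e2]
        simp
    · by_cases he : t' = t
      · subst he
        rw [PySem.Dict.get?_insert_self] at hv'
        simp at hv'
        subst hv'
        exact List.mem_append_right _ (by simp)
      · rw [PySem.Dict.get?_insert_of_ne _ _ he] at hv'
        exact List.mem_append_left _ (h2 t' v' hv')
    · rw [List.countP_append]
      by_cases he : t' = t
      · subst he
        rw [hcount0]
        have : ¬ t' ∈ upd := fun hm => by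
          have := (h3 t').mp hm; omega
        simp [this]
      · rw [h3]
        simp [Ne.symm he]
    · by_cases he : t' = t
      · subst he
        rw [PySem.Dict.get?_insert_self] at hv'
        simp at hv'
        subst hv'
        rcases List.mem_append.mp hw with hw | hw
        · exact absurd hw (hnoS w)
        · simp at hw; omega
      · rw [PySem.Dict.get?_insert_of_ne _ _ he] at hv'
        rcases List.mem_append.mp hw with hw | hw
        · exact h5 t' v' hv' hnu w hw
        · simp at hw; exact absurd hw.1 he
    · exact List.Nodup.append h6 (List.nodup_singleton _) (by simpa using hvS)

lemma inv_fold (ra : List (List (String × Int))) :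
    ∀ (tiv : PySem.Dict Int Int) (upd : PySem.Set Int) (mx : Int)
      (S : PySem.Set (Int × Int)), InvA tiv upd S →
      InvA (ra.foldl stepA (tiv, upd, mx)).1 (ra.foldl stepA (tiv, upd, mx)).2.1
        (ra.foldl pairStep S) := by
  induction ra with
  | nil => intro tiv upd mx S h; exact h
  | cons a l ih =>
    intro tiv upd mx S h
    simp only [List.foldl_cons]
    exact ih (stepA (tiv, upd, mx) a).1 (stepA (tiv, upd, mx) a).2.1
      (stepA (tiv, upd, mx) a).2.2 (pairStep S a)
      (inv_step' tiv upd S (dictGetInt a "track_id") (dictGetInt a "video_id") h)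

-- sorted2 with keys fst/snd yields a list whose first components are non-decreasing
lemma insertBy_lex_map_fst_pairwise (x : Int × Int) (acc : List (Int × Int))
    (h : (acc.map Prod.fst).Pairwise (· ≤ ·)) :
    ((PySem.List.insertBy
        (fun a b => decide (a.1 < b.1) || (!decide (b.1 < a.1) && decide (a.2 < b.2)))
        x acc).map Prod.fst).Pairwise (· ≤ ·) := by
  induction acc with
  | nil => simp [PySem.List.insertBy]
  | cons y ys ih =>
    simp only [List.map_cons, List.pairwise_cons] at h
    obtain ⟨hy, hys⟩ := h
    by_cases hb : (decide (x.1 < y.1) || (!decide (y.1 < x.1) && decide (x.2 < y.2))) = true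
    · rw [show PySem.List.insertBy _ x (y :: ys) = x :: y :: ys by
        simp [PySem.List.insertBy, hb]]
      have hxy : x.1 ≤ y.1 := by
        simp only [Bool.or_eq_true, Bool.and_eq_true, Bool.not_eq_eq_eq_not, Bool.not_true,
          decide_eq_true_eq, decide_eq_false_iff_not] at hb
        omega
      simp only [List.map_cons, List.pairwise_cons]
      refine ⟨?_, hy, hys⟩
      intro a ha
      rcases List.mem_cons.mp ha with rfl | ha
      · exact hxy
      · exact le_trans hxy (hy a ha)
    · rw [show PySem.List.insertBy
          (fun a b => decide (a.1 < b.1) || (!decide (b.1 < a.1) && decide (a.2 < b.2)))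
          x (y :: ys) = y :: PySem.List.insertBy
          (fun a b => decide (a.1 < b.1) || (!decide (b.1 < a.1) && decide (a.2 < b.2))) x ys by
        simp [PySem.List.insertBy, hb]]
      have hyx : y.1 ≤ x.1 := by
        simp only [Bool.or_eq_true, Bool.and_eq_true, Bool.not_eq_eq_eq_not, Bool.not_true,
          decide_eq_true_eq, decide_eq_false_iff_not, not_or, not_and] at hb
        omega
      simp only [List.map_cons, List.pairwise_cons]
      refine ⟨?_, ih hys⟩
      intro a ha
      simp only [List.mem_map] at ha
      obtain ⟨p, hp, rfl⟩ := ha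
      rcases (PySem.List.mem_insertBy _ _ _ _).mp hp with rfl | hp
      · exact hyx
      · exact hy p.1 (List.mem_map.mpr ⟨p, hp, rfl⟩)

lemma sorted2_map_fst_pairwise (xs : List (Int × Int)) :
    ((PySem.List.sorted2 xs Prod.fst Prod.snd).map Prod.fst).Pairwise (· ≤ ·) := by
  show ((xs.foldl (fun acc x => PySem.List.insertBy _ x acc) []).map Prod.fst).Pairwise (· ≤ ·)
  generalize hacc : ([] : List (Int × Int)) = acc
  have h : (acc.map Prod.fst).Pairwise (· ≤ ·) := by rw [← hacc]; simp
  clear hacc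
  induction xs generalizing acc with
  | nil => exact h
  | cons x xs ih =>
    simp only [List.foldl_cons]
    exact ih _ (insertBy_lex_map_fst_pairwise x acc h)

-- in a list of pairs with non-decreasing first components, a value occurs as the first
-- component of two ADJACENT pairs iff it is the first component of at least two pairs
lemma adjShared_mem (P : List (Int × Int)) (t : Int)
    (h : (P.map Prod.fst).Pairwise (· ≤ ·)) :
    t ∈ adjShared P ↔ 1 < P.countP (fun p => p.1 == t) := by
  induction P with
  | nil => simp [adjShared]
  | cons a P ih =>
    cases P with
    | nil =>
      simp [adjShared, List.countP_cons]
      split <;> simp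
    | cons b r =>
      simp only [List.map_cons, List.pairwise_cons] at h
      obtain ⟨ha, hb, hr⟩ := h
      have hP : (((b :: r).map Prod.fst)).Pairwise (· ≤ ·) := by
        simp only [List.map_cons, List.pairwise_cons]; exact ⟨hb, hr⟩
      have hstep : adjShared (a :: b :: r) =
          (if a.1 == b.1 then [a.1] else []) ++ adjShared (b :: r) := by
        simp only [adjShared, List.tail_cons, List.zip_cons_cons, List.filter_cons]
        by_cases he : a.1 == b.1
        · simp [he]
        · simp [he]
      have hcnt : List.countP (fun p => p.1 == t) (a :: b :: r) =
          List.countP (fun p => p.1 == t) (b :: r) + if a.1 = t then 1 else 0 := by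
        simp [List.countP_cons]
      rw [hstep, List.mem_append, ih hP, hcnt]
      by_cases hat : a.1 = t
      · subst hat
        rw [if_pos rfl]
        by_cases hbt : b.1 = a.1
        · -- adjacent equal heads
          have hcb : 0 < (b :: r).countP (fun p => p.1 == a.1) :=
            List.countP_pos_iff.mpr ⟨b, by simp, by simp [hbt]⟩
          constructor
          · intro _; omega
          · intro _
            left
            rw [if_pos (by simp [hbt])]
            simp
        · -- heads differ: a.1 cannot reappear deeper in the sorted list
          have hnor : ∀ p ∈ b :: r, ¬ p.1 = a.1 := by
            intro p hp hpa
            rcases List.mem_cons.mp hp with rfl | hp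
            · exact hbt hpa
            · have g1 : a.1 ≤ b.1 := ha b.1 (by simp)
              have g2 : b.1 ≤ p.1 := hb p.1 (List.mem_map.mpr ⟨p, hp, rfl⟩)
              omega
          have hc0 : (b :: r).countP (fun p => p.1 == a.1) = 0 := by
            rw [List.countP_eq_zero]
            intro p hp
            simpa using hnor p hp
          rw [hc0]
          constructor
          · rintro (hm | hm)
            · rw [if_neg (by simp; exact fun hh => hbt hh.symm)] at hm
              simp at hm
            · omega
          · intro hlt; omega
      · rw [if_neg hat, add_zero]
        have hh : t ∈ (if (a.1 == b.1) = true then [a.1] else []) → t = a.1 := by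
          split <;> simp
        constructor
        · rintro (hm | hm)
          · exact absurd (hh hm).symm hat
          · exact hm
        · exact fun hm => Or.inr hm


-- ===== VERDICT (by name: the statement is the Claim_ definition above) =====
theorem make_track_ids_unique_spec : Claim_equal_make_track_ids_unique := by
  intro ra _hdom _hpre
  unfold Spec_make_track_ids_unique make_track_ids_unique make_track_ids_unique_alt
  have hinv := inv_fold ra PySem.Dict.empty PySem.Set.empty 0 PySem.Set.empty inv_init
  obtain ⟨h1, h2, h3, h4, h5, h6⟩ := hinv
  set S := ra.foldl pairStep PySem.Set.empty with hS
  set upd := (ra.foldl stepA (PySem.Dict.empty, PySem.Set.empty, 0)).2.1 with hupd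
  set P := PySem.List.sorted2 S Prod.fst Prod.snd with hP
  have hperm : P.Perm S := PySem.List.sorted2_perm S Prod.fst Prod.snd false
  have hpair : (P.map Prod.fst).Pairwise (· ≤ ·) := sorted2_map_fst_pairwise S
  have hmem : ∀ t, t ∈ PySem.Set.ofList (adjShared P) ↔ t ∈ upd := by
    intro t
    rw [PySem.Set.mem_ofList, adjShared_mem P t hpair, hperm.countP_eq, h3]
  have hpermfin : upd.Perm (PySem.Set.ofList (adjShared P)) := by
    rw [List.perm_ext_iff_of_nodup h4 (PySem.Set.nodup_ofList _)]
    intro a; rw [hmem]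
  show (upd.length : Int) = ((PySem.Set.ofList (adjShared P)).length : Int)
  rw [hpermfin.length_eq]
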